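-- pv_equiv track=rewrite | github.com/wuyichao71/cs61a | test/scheme_reader.py | line_split
-- ===== SOURCE A (Python) =====
-- def is_space(char):
--     """whether char is a space."""
--     return char == ' ' or char == '\n'
--
-- def is_parentheses(char):
--     """Whether char is a parentheses."""
--     return (char == '(') or (char == ')')
--
-- def is_symbol(char):
--     """Whether a char is a char of symbol."""
--     return not (is_space(char) or is_parentheses(char))
--
-- def line_split(line):
--     """Split line to a list contained all tokens."""
--     is_word = False
--     bi = 0
--     index = 0
--     tokens = []
--     while index < len(line):
--         if is_word:
--             if not is_symbol(line[index]):
--                 tokens.append(line[bi:index])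
--                 is_word = False
--                 if is_parentheses(line[index]):
--                     tokens.append(line[index])
--         else:
--             if is_symbol(line[index]):
--                 bi = index
--                 is_word = True
--             elif is_parentheses(line[index]):
--                 tokens.append(line[index])
--
--
--         # if is_word == False and is_symbol(line[index]):
--         #     bi = index
--         #     is_word = True
--         # elif is_word and (not is_symbol(line[index])):
--         #     tokens.append(line[bi:index])
--         #     is_word = False
--
--         # if is_parentheses(line[index]):
--         #     tokens.append(line[index])
--         index += 1
--     return tokens
-- ===== SOURCE B (Python) =====
-- def line_split(line):
--     """Split line to a list contained all tokens."""
--     tokens = []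
--     word = ""
--     for ch in line:
--         if ch not in ' \n()':
--             word += ch
--         else:
--             if word:
--                 tokens.append(word)
--                 word = ""
--             if ch in '()':
--                 tokens.append(ch)
--     # no final flush: a trailing unterminated word is dropped, as in A
--     return tokens
-- ===== Notes on version B (the rewrite author's own statement) =====
-- stated objective: simpler
-- what changed: Replaces the is_word/begin-index state machine with a single loop accumulating a word buffer that is flushed at each terminator (never after the loop), removing the index arithmetic and slicing.
import Mathlib
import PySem

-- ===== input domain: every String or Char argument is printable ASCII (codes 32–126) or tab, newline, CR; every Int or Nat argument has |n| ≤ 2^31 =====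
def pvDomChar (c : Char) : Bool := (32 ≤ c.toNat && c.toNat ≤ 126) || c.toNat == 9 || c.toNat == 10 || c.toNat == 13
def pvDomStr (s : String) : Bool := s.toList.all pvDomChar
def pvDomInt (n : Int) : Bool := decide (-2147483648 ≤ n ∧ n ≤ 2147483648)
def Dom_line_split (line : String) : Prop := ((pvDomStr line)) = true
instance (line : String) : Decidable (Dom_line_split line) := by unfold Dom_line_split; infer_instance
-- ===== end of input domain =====

-- B replaces A's is_word/begin-index state machine with a word buffer flushed at each terminator (simpler).

-- ===== PORT A =====
def lsIsSpace (c : Char) : Bool := c == ' ' || c == '\n'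
def lsIsParen (c : Char) : Bool := c == '(' || c == ')'
def lsIsSymbol (c : Char) : Bool := !(lsIsSpace c || lsIsParen c)

def lineSplitLoopA (cs : List Char) (isWord : Bool) (bi index : Nat) (tokens : List String) :
    List String :=
  if h : index < cs.length then
    let c := cs[index]
    if isWord then
      if !lsIsSymbol c then
        let tokens := tokens ++ [String.mk (PySem.List.slice cs (some (bi : Int)) (some (index : Int)))]
        let tokens := if lsIsParen c then tokens ++ [String.mk [c]] else tokens
        lineSplitLoopA cs false bi (index + 1) tokens
      else
        lineSplitLoopA cs isWord bi (index + 1) tokens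
    else
      if lsIsSymbol c then
        lineSplitLoopA cs true index (index + 1) tokens
      else if lsIsParen c then
        lineSplitLoopA cs isWord bi (index + 1) (tokens ++ [String.mk [c]])
      else
        lineSplitLoopA cs isWord bi (index + 1) tokens
  else tokens
termination_by cs.length - index

def line_split (line : String) : List String :=
  lineSplitLoopA line.toList false 0 0 []

-- ===== PORT B =====
def lineSplitLoopB (cs : List Char) (word : List Char) (tokens : List String) : List String :=
  match cs with
  | [] => tokens
  | c :: rest =>
    if !(c == ' ' || c == '\n' || c == '(' || c == ')') then
      lineSplitLoopB rest (word ++ [c]) tokens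
    else
      let tokens := if word.isEmpty then tokens else tokens ++ [String.mk word]
      let tokens := if c == '(' || c == ')' then tokens ++ [String.mk [c]] else tokens
      lineSplitLoopB rest [] tokens

def line_split_alt (line : String) : List String :=
  lineSplitLoopB line.toList [] []

-- ===== PRECONDITION & SPEC =====
def Spec_line_split (line : String) (out : List String) : Prop := out = line_split_alt line
instance (line : String) (out : List String) : Decidable (Spec_line_split line out) := by unfold Spec_line_split; infer_instance

-- ===== CLAIM (what is proved, stated in full; the proofs are below) =====
def Claim_equal_line_split : Prop := ∀ (line : String), Dom_line_split line → Spec_line_split line (line_split line)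

-- ===== LEMMAS AND PROOFS =====

theorem lineSplit_loop_agree (cs : List Char) :
    ∀ (k isWord : _) (bi index : Nat) (tokens : List String) (word : List Char),
      cs.length - index ≤ k →
      (isWord = true → bi ≤ index ∧ word = (cs.drop bi).take (index - bi) ∧ word ≠ []) →
      (isWord = false → word = []) →
      lineSplitLoopA cs isWord bi index tokens = lineSplitLoopB (cs.drop index) word tokens := by
  intro k
  induction k with
  | zero =>
    intro isWord bi index tokens word hk hT hF
    have hlen : cs.length ≤ index := by omega
    rw [lineSplitLoopA]
    simp only [dif_neg (by omega : ¬ index < cs.length)]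
    rw [List.drop_eq_nil_of_le hlen, lineSplitLoopB]
  | succ k ih =>
    intro isWord bi index tokens word hk hT hF
    by_cases h : index < cs.length
    · have hdrop : cs.drop index = cs[index] :: cs.drop (index + 1) :=
        List.drop_eq_getElem_cons h
      set c := cs[index] with hc
      have hBside : (!(c == ' ' || c == '\n' || c == '(' || c == ')')) = lsIsSymbol c := by
        cases hA : c == ' ' <;> cases hB : c == '\n' <;> cases hC : c == '(' <;>
          cases hD : c == ')' <;> simp [lsIsSymbol, lsIsSpace, lsIsParen, hA, hB, hC, hD]
      rw [lineSplitLoopA]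
      simp only [dif_pos h]
      rw [hdrop, lineSplitLoopB, hBside]
      cases isWord with
      | true =>
        obtain ⟨hbi, hword, hne⟩ := hT rfl
        cases hsym : lsIsSymbol c with
        | true =>
          -- still in a word: buffer grows by c
          simp only [← hc, Bool.not_true, Bool.false_eq_true, if_false, if_true]
          apply ih true bi (index + 1) tokens (word ++ [c]) (by omega) ?_ (by intro hff; cases hff)
          intro _
          refine ⟨by omega, ?_, by simp⟩
          have hstep : index + 1 - bi = (index - bi) + 1 := by omega
          rw [hstep, List.take_succ, hword]
          have hidx : (cs.drop bi)[index - bi]? = some c := by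
            rw [List.getElem?_drop]
            have hsum : bi + (index - bi) = index := by omega
            rw [hsum]
            exact List.getElem?_eq_getElem h
          simp [hidx]
        | false =>
          -- terminator: A emits the slice, B flushes the (equal, nonempty) buffer
          simp only [← hc, Bool.not_false, Bool.false_eq_true, if_false, if_true]
          have hslice : PySem.List.slice cs (some (bi : Int)) (some (index : Int)) = word := by
            rw [PySem.List.slice_natCast, hword]
          rw [hslice, List.isEmpty_eq_false_iff.mpr hne]
          simp only [Bool.false_eq_true, if_false]
          have hparen : lsIsParen c = (c == '(' || c == ')') := rfl
          rw [hparen]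
          exact ih false bi (index + 1)
            (if (c == '(' || c == ')') = true then (tokens ++ [String.mk word]) ++ [String.mk [c]]
             else tokens ++ [String.mk word]) [] (by omega) (by simp) (fun _ => rfl)
      | false =>
        have hword : word = [] := hF rfl
        subst hword
        cases hsym : lsIsSymbol c with
        | true =>
          simp only [← hc, Bool.not_true, Bool.false_eq_true, if_false, if_true]
          apply ih true index (index + 1) tokens [c] (by omega) ?_ (by intro hff; cases hff)
          intro _
          refine ⟨by omega, ?_, by simp⟩
          have h1 : index + 1 - index = 1 := by omega
          rw [h1]
          have htake : (cs.drop index).take 1 = [c] := by rw [hdrop]; rfl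
          exact htake.symm
        | false =>
          simp only [← hc, Bool.not_false, Bool.false_eq_true, if_false, if_true,
            List.isEmpty_nil]
          have hparen : lsIsParen c = (c == '(' || c == ')') := rfl
          by_cases hp : (c == '(' || c == ')') = true
          · rw [hparen, if_pos hp, if_pos hp]
            exact ih false bi (index + 1) (tokens ++ [String.mk [c]]) [] (by omega)
              (by simp) (fun _ => rfl)
          · rw [hparen, if_neg hp, if_neg hp]
            exact ih false bi (index + 1) tokens [] (by omega) (by simp) (fun _ => rfl)
    · rw [lineSplitLoopA]
      simp only [dif_neg h]
      rw [List.drop_eq_nil_of_le (by omega), lineSplitLoopB]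

-- ===== VERDICT (by name: the statement is the Claim_ definition above) =====
theorem line_split_spec : Claim_equal_line_split := by
  intro line _
  unfold Spec_line_split line_split line_split_alt
  simpa using lineSplit_loop_agree line.toList line.toList.length false 0 0 [] []
    (by omega) (by simp) (fun _ => rfl)
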